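-- pv_equiv track=rewrite | github.com/ActingLin/ReverseNotes | Work/jsReverse/验证码/某港口登录，DX滑块/study/main.py | get_param
-- ===== SOURCE A (Python) =====
-- def get_param(t):
--     if not t:
--         return ""
--
--     g = ""
--     p = 0
--
--     while p < len(t):
--         # 使用 None 作为哨兵值来模拟 JavaScript 中的 NaN
--         f_val = ord(t[p]) if p < len(t) else None
--         p += 1
--         c_val = ord(t[p]) if p < len(t) else None
--         p += 1
--         s_val = ord(t[p]) if p < len(t) else None
--         p += 1
--
--         # 如果是 NaN (None)，则位运算结果为 0；否则进行正常计算
--         f = 0 if f_val is None else f_val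
--         c = 0 if c_val is None else c_val
--         s = 0 if s_val is None else s_val
--
--         d = f >> 2
--         h = ((3 & f) << 4) | (c >> 4)
--         v = ((15 & c) << 2) | (s >> 6)
--         l = 63 & s
--
--         # 模拟JavaScript中的isNaN处理
--         if c_val is None: # 检查原始值是否为 None (即 NaN)
--             v = 64
--             l = 64
--         elif s_val is None: # 检查原始值是否为 None (即 NaN)
--             l = 64
--
--         n = 'S0DOZN9bBJyPV-qczRa3oYvhGlUMrdjW7m2CkE5_FuKiTQXnwe6pg8fs4HAtIL1x='
--         g = g + n[d] + n[h] + n[v] + n[l]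
--
--     return g
-- ===== SOURCE B (Python) =====
-- def get_param(t):
--     if not t:
--         return ""
--     n = 'S0DOZN9bBJyPV-qczRa3oYvhGlUMrdjW7m2CkE5_FuKiTQXnwe6pg8fs4HAtIL1x='
--     bits = ''.join(format(ord(ch), '08b') for ch in t)
--     pad = (-len(t)) % 3
--     bits += '00' * pad
--     return ''.join(n[int(bits[i:i + 6], 2)] for i in range(0, len(bits), 6)) + '=' * pad
-- ===== Notes on version B (the rewrite author's own statement) =====
-- stated objective: alternative
-- what changed: Replaces A's stateful while-loop of per-triple shift/mask bit arithmetic with sentinel None handling and quadratic string concatenation by a bit-string pipeline: concatenate each char's 8 binary digits, zero-pad, regroup into 6-digit groups decoded with int(.,2), join once and append the pad characters.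
import Mathlib
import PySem

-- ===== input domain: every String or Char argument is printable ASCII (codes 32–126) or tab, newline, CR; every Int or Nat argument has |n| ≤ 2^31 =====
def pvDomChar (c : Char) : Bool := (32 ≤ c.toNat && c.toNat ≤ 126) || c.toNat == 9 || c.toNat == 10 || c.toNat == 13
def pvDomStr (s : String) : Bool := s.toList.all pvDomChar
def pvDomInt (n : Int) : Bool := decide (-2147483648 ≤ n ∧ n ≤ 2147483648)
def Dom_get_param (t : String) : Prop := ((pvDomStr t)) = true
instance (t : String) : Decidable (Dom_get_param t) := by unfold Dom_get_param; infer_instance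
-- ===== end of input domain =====

-- B re-encodes via an explicit binary-digit string: concatenate 8 bits per char, zero-pad, regroup into 6-bit values — a different decomposition from A's per-triple shift/mask while-loop (alternative; also avoids A's quadratic string concatenation).


-- ===== PORT A =====
-- the custom alphabet; on Dom every computed index is in range, so getD's default is never used
def pvN : List Char := "S0DOZN9bBJyPV-qczRa3oYvhGlUMrdjW7m2CkE5_FuKiTQXnwe6pg8fs4HAtIL1x=".toList
def pvIdx (i : Nat) : Char := pvN.getD i '?'

-- one iteration of A's while body: the three Option values mirror the None sentinels
def aChunk (f_val c_val s_val : Option Nat) : List Char :=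
  let f := f_val.getD 0
  let c := c_val.getD 0
  let s := s_val.getD 0
  let d := f >>> 2
  let h := ((3 &&& f) <<< 4) ||| (c >>> 4)
  let v := ((15 &&& c) <<< 2) ||| (s >>> 6)
  let l := 63 &&& s
  let v' := if c_val = none then 64 else v
  let l' := if c_val = none then 64 else if s_val = none then 64 else l
  [pvIdx d, pvIdx h, pvIdx v', pvIdx l']

-- A's while loop over the remaining characters (p advances 3 per iteration)
def aLoop : List Char → List Char
  | [] => []
  | [a] => aChunk (some a.toNat) none none
  | [a, b] => aChunk (some a.toNat) (some b.toNat) none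
  | a :: b :: c :: r => aChunk (some a.toNat) (some b.toNat) (some c.toNat) ++ aLoop r

def get_param (t : String) : String :=
  if t = "" then "" else String.ofList (aLoop t.toList)

-- ===== PORT B =====
-- format(x, '08b'): the eight binary digits of x, most significant first
def bits8 (x : Nat) : List Nat :=
  [x / 128 % 2, x / 64 % 2, x / 32 % 2, x / 16 % 2, x / 8 % 2, x / 4 % 2, x / 2 % 2, x % 2]

-- int(bits[i:i+6], 2) for each 6-digit group of the bit string
def binChunks : List Nat → List Char
  | b0 :: b1 :: b2 :: b3 :: b4 :: b5 :: rest =>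
      pvIdx (32 * b0 + 16 * b1 + 8 * b2 + 4 * b3 + 2 * b4 + b5) :: binChunks rest
  | _ => []

def get_param_alt (t : String) : String :=
  if t = "" then "" else
    let bits := (t.toList.map (fun ch => bits8 ch.toNat)).flatten
    let pad := (3 - t.toList.length % 3) % 3   -- (-len(t)) % 3, written on Nat
    String.ofList (binChunks (bits ++ List.replicate (2 * pad) 0) ++ List.replicate pad '=')

-- ===== PRECONDITION & SPEC =====
def Spec_get_param (t : String) (out : String) : Prop := out = get_param_alt t
instance (t : String) (out : String) : Decidable (Spec_get_param t out) := by unfold Spec_get_param; infer_instance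

-- ===== CLAIM (what is proved, stated in full; the proofs are below) =====
def Claim_equal_get_param : Prop := ∀ (t : String), Dom_get_param t → Spec_get_param t (get_param t)

-- ===== LEMMAS AND PROOFS =====
theorem pvIdx64 : pvIdx 64 = '=' := by decide

theorem chunk1 (f : Nat) (hf : f < 256) :
    32 * (f / 128 % 2) + 16 * (f / 64 % 2) + 8 * (f / 32 % 2) + 4 * (f / 16 % 2)
      + 2 * (f / 8 % 2) + f / 4 % 2 = f >>> 2 := by
  rw [Nat.shiftRight_eq_div_pow]; norm_num; omega

theorem chunk2 (f c : Nat) (hc : c < 256) :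
    32 * (f / 2 % 2) + 16 * (f % 2) + 8 * (c / 128 % 2) + 4 * (c / 64 % 2)
      + 2 * (c / 32 % 2) + c / 16 % 2 = ((3 &&& f) <<< 4) ||| (c >>> 4) := by
  have h1 : 3 &&& f = f % 4 := by
    simpa [Nat.and_comm] using Nat.and_two_pow_sub_one_eq_mod f 2
  have h2 : c >>> 4 = c / 16 := by simp [Nat.shiftRight_eq_div_pow]
  have h3 : (f % 4) <<< 4 = 2 ^ 4 * (f % 4) := by rw [Nat.shiftLeft_eq]; ring
  rw [h1, h2, h3, ← Nat.two_pow_add_eq_or_of_lt (by omega : c / 16 < 2 ^ 4)]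
  have h4 : (2 : Nat) ^ 4 = 16 := by norm_num
  rw [h4]; omega

theorem chunk3 (c s : Nat) (hs : s < 256) :
    32 * (c / 8 % 2) + 16 * (c / 4 % 2) + 8 * (c / 2 % 2) + 4 * (c % 2)
      + 2 * (s / 128 % 2) + s / 64 % 2 = ((15 &&& c) <<< 2) ||| (s >>> 6) := by
  have h1 : 15 &&& c = c % 16 := by
    simpa [Nat.and_comm] using Nat.and_two_pow_sub_one_eq_mod c 4
  have h2 : s >>> 6 = s / 64 := by simp [Nat.shiftRight_eq_div_pow]
  have h3 : (c % 16) <<< 2 = 2 ^ 2 * (c % 16) := by rw [Nat.shiftLeft_eq]; ring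
  rw [h1, h2, h3, ← Nat.two_pow_add_eq_or_of_lt (by omega : s / 64 < 2 ^ 2)]
  have h4 : (2 : Nat) ^ 2 = 4 := by norm_num
  rw [h4]; omega

theorem chunk4 (s : Nat) :
    32 * (s / 32 % 2) + 16 * (s / 16 % 2) + 8 * (s / 8 % 2) + 4 * (s / 4 % 2)
      + 2 * (s / 2 % 2) + s % 2 = 63 &&& s := by
  have h1 : 63 &&& s = s % 64 := by
    simpa [Nat.and_comm] using Nat.and_two_pow_sub_one_eq_mod s 6
  rw [h1]; omega

theorem binChunks_triple (f c s : Nat) (hf : f < 256) (hc : c < 256) (hs : s < 256)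
    (rest : List Nat) :
    binChunks (bits8 f ++ (bits8 c ++ (bits8 s ++ rest))) =
      pvIdx (f >>> 2) :: pvIdx (((3 &&& f) <<< 4) ||| (c >>> 4)) ::
      pvIdx (((15 &&& c) <<< 2) ||| (s >>> 6)) :: pvIdx (63 &&& s) :: binChunks rest := by
  simp only [bits8, List.cons_append, List.nil_append, binChunks]
  rw [chunk1 f hf, chunk2 f c hc, chunk3 c s hs, chunk4 s]

theorem main_lemma (l : List Char) (hd : ∀ c ∈ l, c.toNat < 256) :
    binChunks ((l.map (fun ch => bits8 ch.toNat)).flatten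
        ++ List.replicate (2 * ((3 - l.length % 3) % 3)) 0)
      ++ List.replicate ((3 - l.length % 3) % 3) '=' = aLoop l := by
  induction l using aLoop.induct with
  | case1 => simp [aLoop, binChunks]
  | case2 a =>
      have ha : a.toNat < 256 := hd a (by simp)
      have t1 := chunk1 a.toNat ha
      have t2 : 32 * (a.toNat / 2 % 2) + 16 * (a.toNat % 2)
          = (3 &&& a.toNat) <<< 4 := by
        simpa using chunk2 a.toNat 0 (by norm_num)
      simp only [aLoop, aChunk, List.map, List.flatten, List.length]
      norm_num [bits8, binChunks, pvIdx64, t1, t2, List.replicate, reduceCtorEq]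
  | case3 a b =>
      have ha : a.toNat < 256 := hd a (by simp)
      have hb : b.toNat < 256 := hd b (by simp)
      have t1 := chunk1 a.toNat ha
      have t2 := chunk2 a.toNat b.toNat hb
      have t3 : 32 * (b.toNat / 8 % 2) + 16 * (b.toNat / 4 % 2) + 8 * (b.toNat / 2 % 2)
          + 4 * (b.toNat % 2) = (15 &&& b.toNat) <<< 2 := by
        simpa using chunk3 b.toNat 0 (by norm_num)
      simp only [aLoop, aChunk, List.map, List.flatten, List.length]
      norm_num [bits8, binChunks, pvIdx64, t1, t2, t3, List.replicate, reduceCtorEq]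
      simp
  | case4 a b c r ih =>
      have ha : a.toNat < 256 := hd a (by simp)
      have hb : b.toNat < 256 := hd b (by simp)
      have hc : c.toNat < 256 := hd c (by simp)
      have hmod : ((a :: b :: c :: r).length % 3) = r.length % 3 := by
        simp [List.length]; omega
      simp only [List.map, List.flatten, hmod, List.append_eq, List.append_assoc]
      rw [binChunks_triple a.toNat b.toNat c.toNat ha hb hc]
      simp only [aLoop, aChunk, List.cons_append]
      simp only [reduceCtorEq, Option.getD_some, ite_false]
      rw [ih (fun x hx => hd x (by simp [hx]))]
      simp

-- ===== VERDICT (by name: the statement is the Claim_ definition above) =====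
theorem get_param_spec : Claim_equal_get_param := by
  intro t hdom
  unfold Spec_get_param get_param get_param_alt
  by_cases h : t = ""
  · simp [h]
  · simp only [if_neg h]
    refine congrArg String.ofList ?_ |>.symm
    apply main_lemma
    intro c hcmem
    simp only [Dom_get_param, pvDomStr, List.all_eq_true] at hdom
    have := hdom c hcmem
    simp [pvDomChar] at this
    omega
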